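-- pv_equiv track=rewrite | github.com/duykha0205/Algorithm | hackerank/sansaXor.py | sansaXor
-- ===== SOURCE A (Python) =====
-- def sansaXor(arr) -> int:
--     n = len(arr)
--     res = 0
--     for i in range(n):
--         freq = (i+1) * (n-i)
--         if freq % 2 != 0:
--             res ^= arr[i]
--     return res
-- ===== SOURCE B (Python) =====
-- def sansaXor(arr) -> int:
--     # B: for even-length input every element occurs an even number of times in
--     # the contiguous subarrays, so the answer is 0; for odd length exactly the
--     # even-indexed elements occur an odd number of times, so XOR the stride-2
--     # slice arr[::2].
--     if len(arr) % 2 == 0: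
--         return 0
--     res = 0
--     for x in arr[::2]:
--         res ^= x
--     return res
-- ===== Notes on version B (the rewrite author's own statement) =====
-- stated objective: simpler
-- what changed: B drops A's per-index (i+1)*(n-i) frequency parity test: it returns 0 outright for even-length input and otherwise XORs the stride-2 slice arr[::2].
import Mathlib
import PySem

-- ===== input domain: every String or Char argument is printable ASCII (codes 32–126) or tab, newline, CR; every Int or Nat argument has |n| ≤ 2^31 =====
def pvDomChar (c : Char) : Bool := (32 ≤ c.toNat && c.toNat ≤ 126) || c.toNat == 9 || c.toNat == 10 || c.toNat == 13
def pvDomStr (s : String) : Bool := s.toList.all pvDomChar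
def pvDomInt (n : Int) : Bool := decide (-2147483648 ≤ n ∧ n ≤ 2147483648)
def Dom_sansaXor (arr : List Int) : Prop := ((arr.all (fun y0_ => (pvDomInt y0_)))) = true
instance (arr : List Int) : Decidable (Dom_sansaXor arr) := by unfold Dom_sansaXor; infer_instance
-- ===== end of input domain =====

-- B returns 0 immediately for even-length input and otherwise XORs the stride-2
-- slice arr[::2], replacing A's per-index (i+1)*(n-i) frequency parity test (objective: simpler).


-- ===== PORT A =====
-- arr[i] with 0 ≤ i < len(arr) never raises; ported as pyGetD (exact on in-range indices)
def sansaXor (arr : List Int) : Int :=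
  let n := PySem.List.len arr
  (PySem.List.pyRange 0 n 1).foldl
    (fun res i =>
      if PySem.Int.mod ((i + 1) * (n - i)) 2 ≠ 0 then PySem.Int.bxor res (PySem.List.pyGetD arr i 0) else res) 0

-- ===== PORT B =====
-- hand port of the extended slice xs[::2] (PySem has no step slices): exactly
-- the elements at indices 0, 2, 4, …
def stride2 : List Int → List Int
  | [] => []
  | [x] => [x]
  | x :: _ :: t => x :: stride2 t

def sansaXor_alt (arr : List Int) : Int :=
  if PySem.Int.mod (PySem.List.len arr) 2 = 0 then 0
  else (stride2 arr).foldl (fun res x => PySem.Int.bxor res x) 0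

-- ===== PRECONDITION & SPEC =====
def Spec_sansaXor (arr : List Int) (out : Int) : Prop := out = sansaXor_alt arr
instance (arr : List Int) (out : Int) : Decidable (Spec_sansaXor arr out) := by unfold Spec_sansaXor; infer_instance

-- ===== CLAIM (what is proved, stated in full; the proofs are below) =====
def Claim_equal_sansaXor : Prop := ∀ (arr : List Int), Dom_sansaXor arr → Spec_sansaXor arr (sansaXor arr)

-- ===== LEMMAS AND PROOFS =====

-- A conditional xor-fold is the plain xor-fold over the filtered index list.
lemma foldl_xor_ite (p : Int → Prop) [DecidablePred p] (f : Int → Int) :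
    ∀ (l : List Int) (acc : Int),
      l.foldl (fun r i => if p i then PySem.Int.bxor r (f i) else r) acc
        = (l.filter (fun i => decide (p i))).foldl (fun r i => PySem.Int.bxor r (f i)) acc := by
  intro l
  induction l with
  | nil => intro acc; simp
  | cons a t ih =>
      intro acc
      by_cases h : p a <;> simp [h, ih]

-- Parity of A's frequency (i+1)*(n-i): even whenever n is even …
lemma freq_mod_even (n i : Int) (hn : n % 2 = 0) :
    PySem.Int.mod ((i + 1) * (n - i)) 2 = 0 := by
  rw [PySem.Int.mod_eq_emod_of_pos (by norm_num), Int.mul_emod]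
  rcases Int.emod_two_eq (i + 1) with h | h <;>
    rcases Int.emod_two_eq (n - i) with h' | h' <;> simp [h, h'] <;> omega

-- … and, for odd n, odd exactly at the even indices.
lemma freq_mod_odd (n i : Int) (hn : n % 2 = 1) :
    (PySem.Int.mod ((i + 1) * (n - i)) 2 ≠ 0) ↔ i % 2 = 0 := by
  rw [PySem.Int.mod_eq_emod_of_pos (by norm_num), Int.mul_emod]
  rcases Int.emod_two_eq (i + 1) with h | h <;>
    rcases Int.emod_two_eq (n - i) with h' | h' <;> simp [h, h'] <;> omega

-- Even members of range(m) are exactly 2*range((m+1)/2) (Nat version).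
lemma filter_even_range (m : Nat) :
    (List.range m).filter (fun k => decide (k % 2 = 0))
      = (List.range ((m + 1) / 2)).map (fun k => 2 * k) := by
  induction m with
  | zero => simp
  | succ m ih =>
      rw [List.range_succ, List.filter_append, ih]
      by_cases h : m % 2 = 0
      · have h2 : (m + 1 + 1) / 2 = (m + 1) / 2 + 1 := by omega
        have h3 : 2 * ((m + 1) / 2) = m := by omega
        simp [h2, List.range_succ, h, h3]
      · have h2 : (m + 1 + 1) / 2 = (m + 1) / 2 := by omega
        simp [h2, h]

-- For odd n, A's filtered index list is the even-index list (Nat-cast form).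
lemma filter_range_eq (n : Int) (h0 : 0 ≤ n) (hn : n % 2 = 1) :
    (PySem.List.pyRange 0 n 1).filter
        (fun i => decide (PySem.Int.mod ((i + 1) * (n - i)) 2 ≠ 0))
      = (List.range ((n.toNat + 1) / 2)).map (fun k => ((2 * k : Nat) : Int)) := by
  rw [PySem.List.pyRange_one]
  rw [List.filter_map]
  have hfc : ((List.range (n - 0).toNat).filter
        ((fun i => decide (PySem.Int.mod ((i + 1) * (n - i)) 2 ≠ 0)) ∘ (fun k : Nat => 0 + (k : Int))))
      = (List.range (n - 0).toNat).filter (fun k => decide (k % 2 = 0)) := by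
    apply List.filter_congr
    intro k _
    simp only [Function.comp, zero_add]
    apply decide_eq_decide.mpr
    rw [freq_mod_odd n (k : Int) hn]
    omega
  rw [hfc, filter_even_range]
  rw [List.map_map]
  have hlen : (n - 0).toNat = n.toNat := by omega
  rw [hlen]
  apply List.map_congr_left
  intro k _
  simp

-- The even-indexed elements, read off through getD, are the stride-2 slice.
lemma map_getD_stride2 : ∀ (arr : List Int),
    (List.range ((arr.length + 1) / 2)).map (fun k => arr.getD (2 * k) 0) = stride2 arr := by
  intro arr
  induction arr using stride2.induct with
  | case1 => simp [stride2]
  | case2 x => simp [stride2]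
  | case3 x y t ih =>
      have hm : ((x :: y :: t).length + 1) / 2 = (t.length + 1) / 2 + 1 := by
        simp; omega
      rw [hm, List.range_succ_eq_map, List.map_cons, List.map_map]
      have : ((fun k => (x :: y :: t).getD (2 * k) 0) ∘ Nat.succ)
          = fun k => t.getD (2 * k) 0 := by
        funext k
        have : 2 * Nat.succ k = 2 * k + 1 + 1 := by omega
        simp [this]
      rw [this, ih]
      simp [stride2]

-- mod n 2 agrees with % for the length
lemma mod_two (n : Int) : PySem.Int.mod n 2 = n % 2 :=
  PySem.Int.mod_eq_emod_of_pos (by norm_num)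

-- ===== VERDICT (by name: the statement is the Claim_ definition above) =====
theorem sansaXor_spec : Claim_equal_sansaXor := by
  intro arr _
  unfold Spec_sansaXor sansaXor sansaXor_alt
  simp only []
  set n : Int := PySem.List.len arr with hn
  have h0 : 0 ≤ n := by simp [hn, PySem.List.len]
  rw [foldl_xor_ite (fun i => PySem.Int.mod ((i + 1) * (n - i)) 2 ≠ 0) (fun i => PySem.List.pyGetD arr i 0)]
  by_cases he : PySem.Int.mod n 2 = 0
  · rw [if_pos he]
    have : (PySem.List.pyRange 0 n 1).filter
        (fun i => decide (PySem.Int.mod ((i + 1) * (n - i)) 2 ≠ 0)) = [] := by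
      apply List.filter_eq_nil_iff.mpr
      intro i _
      simp only [decide_eq_true_eq, Decidable.not_not]
      exact freq_mod_even n i (by rw [← mod_two]; exact he)
    rw [this]
    rfl
  · rw [if_neg he]
    have hodd : n % 2 = 1 := by
      rcases PySem.Int.mod_two_eq n with h | h
      · exact absurd h he
      · rw [← mod_two]; exact h
    rw [filter_range_eq n h0 hodd]
    have hlen : n.toNat = arr.length := by simp [hn, PySem.List.len]
    rw [hlen]
    rw [List.foldl_map]
    have hfun : (fun (r : Int) (k : Nat) => PySem.Int.bxor r (PySem.List.pyGetD arr ((2 * k : Nat) : Int) 0))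
        = fun r k => PySem.Int.bxor r (arr.getD (2 * k) 0) := by
      funext r k
      rw [PySem.List.pyGetD_natCast]
    rw [hfun]
    calc (List.range ((arr.length + 1) / 2)).foldl (fun r k => PySem.Int.bxor r (arr.getD (2 * k) 0)) 0
        = ((List.range ((arr.length + 1) / 2)).map (fun k => arr.getD (2 * k) 0)).foldl
            (fun res x => PySem.Int.bxor res x) 0 := by
          rw [List.foldl_map]
      _ = (stride2 arr).foldl (fun res x => PySem.Int.bxor res x) 0 := by
          rw [map_getD_stride2]
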